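-- pv_equiv track=rewrite | github.com/Fleymus/MyProject | task2.py | Ipower
-- ===== SOURCE A (Python) =====
-- def Ipower(n, b):
--     if n < 1 or b < 1:
--         return False
--     if n == 1:
--         return True
--     if b == 1:
--         return n == 1
--     power = 1
--     while power < n:
--         power *= b
--     return power == n
-- ===== SOURCE B (Python) =====
-- def Ipower(n, b):
--     if n < 1 or b < 1:
--         return False
--     if n == 1:
--         return True
--     if b == 1:
--         return n == 1
--     while n % b == 0:
--         n //= b
--     return n == 1
-- ===== Notes on version B (the rewrite author's own statement) =====
-- stated objective: simpler
-- what changed: Instead of multiplying an accumulator power up from 1 until it reaches n, B divides n down by b while divisible and checks whether the residue is 1.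
import Mathlib
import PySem

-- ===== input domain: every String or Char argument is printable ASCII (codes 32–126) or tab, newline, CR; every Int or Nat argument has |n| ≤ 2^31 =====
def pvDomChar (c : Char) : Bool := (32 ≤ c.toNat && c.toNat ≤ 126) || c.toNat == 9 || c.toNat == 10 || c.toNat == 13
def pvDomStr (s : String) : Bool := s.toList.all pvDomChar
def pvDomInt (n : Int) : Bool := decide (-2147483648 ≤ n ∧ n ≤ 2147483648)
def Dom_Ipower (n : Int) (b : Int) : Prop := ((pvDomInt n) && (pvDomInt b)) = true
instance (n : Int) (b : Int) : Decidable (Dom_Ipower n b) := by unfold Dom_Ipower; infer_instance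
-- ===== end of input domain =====

-- B replaces A's grow-the-power loop by dividing n down by b while divisible; equivalence of return values proved on the whole domain.

-- ===== PORT A =====
-- while power < n: power *= b   (only reached with 2 ≤ b and power = 1; the extra
-- guard conjuncts are loop invariants, added only to make the recursion terminate)
def IpowerLoop (n : Int) (b : Int) (power : Int) : Bool :=
  if _h : power < n ∧ 2 ≤ b ∧ 1 ≤ power then
    IpowerLoop n b (power * b)
  else
    power == n
termination_by (n - power).toNat
decreasing_by
  have h2 : power * 2 ≤ power * b :=
    mul_le_mul_of_nonneg_left _h.2.1 (by omega)
  omega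

def Ipower (n : Int) (b : Int) : Bool :=
  if n < 1 ∨ b < 1 then false
  else if n = 1 then true
  else if b = 1 then n == 1
  else IpowerLoop n b 1

-- ===== PORT B =====
-- while n % b == 0: n //= b   (only reached with 2 ≤ b and 1 ≤ n; extra guard
-- conjuncts are loop invariants, added only to make the recursion terminate)
def IpowerAltLoop (n : Int) (b : Int) : Int :=
  if _h : PySem.Int.mod n b = 0 ∧ 2 ≤ b ∧ 1 ≤ n then
    IpowerAltLoop (PySem.Int.floordiv n b) b
  else
    n
termination_by n.toNat
decreasing_by
  have hb : (0:Int) < b := by omega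
  rw [PySem.Int.floordiv_eq_ediv_of_pos hb]
  have h1 : n / b * b ≤ n := Int.ediv_mul_le n (by omega)
  have h2 : n / b * 2 ≤ n / b * b :=
    mul_le_mul_of_nonneg_left _h.2.1 (Int.ediv_nonneg (by omega) (by omega))
  have h3 : 0 ≤ n / b := Int.ediv_nonneg (by omega) (by omega)
  omega

def Ipower_alt (n : Int) (b : Int) : Bool :=
  if n < 1 ∨ b < 1 then false
  else if n = 1 then true
  else if b = 1 then n == 1
  else IpowerAltLoop n b == 1

-- ===== PRECONDITION & SPEC =====
def Spec_Ipower (n : Int) (b : Int) (out : Bool) : Prop := out = Ipower_alt n b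
instance (n : Int) (b : Int) (out : Bool) : Decidable (Spec_Ipower n b out) := by unfold Spec_Ipower; infer_instance

-- ===== CLAIM (what is proved, stated in full; the proofs are below) =====
def Claim_equal_Ipower : Prop := ∀ (n : Int) (b : Int), Dom_Ipower n b → Spec_Ipower n b (Ipower n b)

-- ===== LEMMAS AND PROOFS =====

-- A's loop returns true iff power * b^k hits n for some k
theorem IpowerLoop_iff (n b power : Int) (hb : 2 ≤ b) (hp : 1 ≤ power) :
    IpowerLoop n b power = true ↔ ∃ k : ℕ, power * b ^ k = n := by
  by_cases hlt : power < n
  · rw [IpowerLoop, dif_pos ⟨hlt, hb, hp⟩]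
    have hp' : 1 ≤ power * b := by nlinarith
    rw [IpowerLoop_iff n b (power * b) hb hp']
    constructor
    · rintro ⟨k, hk⟩
      exact ⟨k + 1, by rw [← hk]; ring⟩
    · rintro ⟨k, hk⟩
      cases k with
      | zero => simp at hk; omega
      | succ k => exact ⟨k, by rw [← hk]; ring⟩
  · rw [IpowerLoop, dif_neg (by tauto)]
    simp only [beq_iff_eq]
    constructor
    · intro h; exact ⟨0, by simpa using h⟩
    · rintro ⟨k, hk⟩
      have hb1 : (1:Int) ≤ b ^ k := one_le_pow₀ (by omega)
      have : power ≤ power * b ^ k := by nlinarith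
      omega
termination_by (n - power).toNat
decreasing_by
  have h2 : power * 2 ≤ power * b := mul_le_mul_of_nonneg_left hb (by omega)
  omega

-- B's loop result equals 1 iff b^k hits n for some k
theorem IpowerAltLoop_iff (n b : Int) (hb : 2 ≤ b) (hn : 1 ≤ n) :
    (IpowerAltLoop n b = 1) ↔ ∃ k : ℕ, b ^ k = n := by
  have hb0 : (0:Int) < b := by omega
  by_cases hdvd : b ∣ n
  · have hmod : PySem.Int.mod n b = 0 := (PySem.Int.mod_eq_zero_iff_dvd n b).mpr hdvd
    rw [IpowerAltLoop, dif_pos ⟨hmod, hb, hn⟩]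
    rw [PySem.Int.floordiv_eq_ediv_of_pos hb0]
    obtain ⟨m, hm⟩ := hdvd
    have hm1 : 1 ≤ m := by nlinarith
    have hdiv : n / b = m := by rw [hm, Int.mul_ediv_cancel_left _ (by omega)]
    rw [hdiv, IpowerAltLoop_iff m b hb hm1]
    constructor
    · rintro ⟨k, hk⟩; exact ⟨k + 1, by rw [hm, ← hk]; ring⟩
    · rintro ⟨k, hk⟩
      cases k with
      | zero =>
        simp only [pow_zero] at hk
        have : 2 * m ≤ b * m := by nlinarith
        omega
      | succ k =>
        refine ⟨k, ?_⟩
        have : b * b ^ k = b * m := by rw [← pow_succ']; omega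
        exact mul_left_cancel₀ (by omega) this
  · have hmod : ¬ PySem.Int.mod n b = 0 := fun h => hdvd ((PySem.Int.mod_eq_zero_iff_dvd n b).mp h)
    rw [IpowerAltLoop, dif_neg (by tauto)]
    constructor
    · intro h; exact ⟨0, by simp [h]⟩
    · rintro ⟨k, hk⟩
      cases k with
      | zero => simpa using hk.symm
      | succ k => exact absurd ⟨b ^ k, by rw [← hk]; ring⟩ hdvd
termination_by n.toNat
decreasing_by
  have h2 : 2 * m ≤ b * m := by nlinarith
  omega

-- ===== VERDICT (by name: the statement is the Claim_ definition above) =====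
theorem Ipower_spec : Claim_equal_Ipower := by
  intro n b _hd
  unfold Spec_Ipower Ipower Ipower_alt
  split_ifs with h1 h2 _h3
  · rfl
  · rfl
  · rfl
  · push Not at h1
    have hb : 2 ≤ b := by omega
    have hn : 1 ≤ n := h1.1
    have hA := IpowerLoop_iff n b 1 hb le_rfl
    simp only [one_mul] at hA
    have hB := IpowerAltLoop_iff n b hb hn
    rcases hAv : IpowerLoop n b 1 with _ | _
    · have hne : ¬ ∃ k : ℕ, b ^ k = n := by rw [← hA, hAv]; simp
      have : IpowerAltLoop n b ≠ 1 := fun h => hne (hB.mp h)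
      simp [this]
    · have hex : ∃ k : ℕ, b ^ k = n := hA.mp hAv
      simp [hB.mpr hex]
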